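-- pv_equiv track=rewrite | github.com/a-t-0/email_if_website_changes | code/project1/src/helper.py | parse_creds
-- ===== SOURCE A (Python) =====
-- def parse_creds(lines):
--     username_identifier = "GITLAB_SERVER_ACCOUNT_GLOBAL="
--     pwd_identifier = "GITLAB_SERVER_PASSWORD_GLOBAL="
--     username = None
--     pwd = None
--     for line in lines:
--         if line[: len(username_identifier)] == username_identifier:
--             username = line[len(username_identifier) :]
--         if line[: len(pwd_identifier)] == pwd_identifier:
--             pwd = line[len(pwd_identifier) :]
--     if not username is None:
--         if not pwd is None:
--             return username, pwd
--         else: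
--             raise Exception("Did not get password.")
--     else:
--         raise Exception("Did not get username.")
-- ===== SOURCE B (Python) =====
-- def parse_creds(lines):
--     table = {}
--     for line in lines:
--         key, sep, val = line.partition("=")
--         if sep:
--             table[key] = val
--     username = table.get("GITLAB_SERVER_ACCOUNT_GLOBAL")
--     pwd = table.get("GITLAB_SERVER_PASSWORD_GLOBAL")
--     if username is None:
--         raise Exception("Did not get username.")
--     if pwd is None:
--         raise Exception("Did not get password.")
--     return username, pwd
-- ===== Notes on version B (the rewrite author's own statement) =====
-- stated objective: idiomatic
-- what changed: Replaces inline prefix-matching with hard-coded slice lengths by a single pass that partitions each line on its first '=' into a dict and then looks the two keys up.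
import Mathlib
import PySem

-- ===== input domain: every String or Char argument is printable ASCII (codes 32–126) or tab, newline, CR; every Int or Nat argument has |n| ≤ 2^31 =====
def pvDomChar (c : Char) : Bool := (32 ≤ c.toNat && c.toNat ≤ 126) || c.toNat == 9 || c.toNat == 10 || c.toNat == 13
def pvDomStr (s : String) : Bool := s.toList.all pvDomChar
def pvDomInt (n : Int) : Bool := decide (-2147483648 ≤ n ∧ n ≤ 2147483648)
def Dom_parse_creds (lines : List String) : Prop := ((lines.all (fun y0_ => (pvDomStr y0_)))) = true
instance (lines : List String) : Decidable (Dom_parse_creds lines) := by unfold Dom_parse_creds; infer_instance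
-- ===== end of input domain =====

-- B replaces A's inline prefix tests with hard-coded slice lengths by one pass that partitions
-- each line on its first '=' into a dict and then looks the two keys up (idiomatic; same cost).

-- ===== PORT A =====
-- loop body: line[:29] == uid → username = line[29:]; line[:30] == pid → pwd = line[30:]
def pvStepA (st : Option String × Option String) (line : String) : Option String × Option String :=
  let st1 := if PySem.Str.slice line none (some (29:Int)) == "GITLAB_SERVER_ACCOUNT_GLOBAL="
             then (some (PySem.Str.slice line (some (29:Int)) none), st.2) else st
  if PySem.Str.slice line none (some (30:Int)) == "GITLAB_SERVER_PASSWORD_GLOBAL="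
  then (st1.1, some (PySem.Str.slice line (some (30:Int)) none)) else st1

def parse_creds (lines : List String) : String × String :=
  match lines.foldl pvStepA (none, none) with
  | (some u, some p) => (u, p)
  | _ => ("", "")  -- Python raises here ("Did not get username/password."); excluded by Pre_parse_creds

-- ===== PORT B =====
-- hand port of line.partition("="): split on the FIRST '=' (exact for the 1-char separator)
def pvPartitionEq (acc : List Char) : List Char → List Char × Bool × List Char
  | [] => (acc.reverse, false, [])
  | c :: cs => if c = '=' then (acc.reverse, true, cs) else pvPartitionEq (c :: acc) cs

-- loop body: if sep: table[key] = val
def pvStepB (d : PySem.Dict String String) (line : String) : PySem.Dict String String :=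
  match pvPartitionEq [] line.toList with
  | (k, true, v) => d.insert (String.ofList k) (String.ofList v)
  | _ => d

def parse_creds_alt (lines : List String) : String × String :=
  let d := lines.foldl pvStepB PySem.Dict.empty
  match d.get? "GITLAB_SERVER_ACCOUNT_GLOBAL" with
  | none => ("", "")  -- Python raises "Did not get username."; excluded by Pre_parse_creds
  | some u =>
    match d.get? "GITLAB_SERVER_PASSWORD_GLOBAL" with
    | none => ("", "")  -- Python raises "Did not get password."; excluded by Pre_parse_creds
    | some p => (u, p)

-- ===== PRECONDITION & SPEC =====
-- Pre_ excludes exactly the inputs on which the Python A (and B alike) raises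
-- "Did not get username."/"Did not get password.": some line must start with each identifier.
def Pre_parse_creds (lines : List String) : Prop :=
  (lines.any (fun s => PySem.Str.startswith s "GITLAB_SERVER_ACCOUNT_GLOBAL=")) = true ∧
  (lines.any (fun s => PySem.Str.startswith s "GITLAB_SERVER_PASSWORD_GLOBAL=")) = true
instance (lines : List String) : Decidable (Pre_parse_creds lines) := by
  unfold Pre_parse_creds; infer_instance
def pvWitness_parse_creds : List String :=
  ["GITLAB_SERVER_ACCOUNT_GLOBAL=alice", "GITLAB_SERVER_PASSWORD_GLOBAL=s3cret"]
def Spec_parse_creds (lines : List String) (out : String × String) : Prop := out = parse_creds_alt lines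
instance (lines : List String) (out : String × String) : Decidable (Spec_parse_creds lines out) := by unfold Spec_parse_creds; infer_instance

-- ===== CLAIM (what is proved, stated in full; the proofs are below) =====
def Claim_equal_parse_creds : Prop := ∀ (lines : List String), Dom_parse_creds lines → Pre_parse_creds lines → Spec_parse_creds lines (parse_creds lines)

-- ===== LEMMAS AND PROOFS =====
theorem pvPartition_of_split : ∀ (p : List Char) (rest acc : List Char), '=' ∉ p →
    pvPartitionEq acc (p ++ '=' :: rest) = (acc.reverse ++ p, true, rest) := by
  intro p
  induction p with
  | nil => intro rest acc _; simp [pvPartitionEq]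
  | cons c cs ih =>
    intro rest acc hp
    simp only [List.mem_cons, not_or] at hp
    have hc : ¬ c = '=' := fun h => hp.1 h.symm
    simp only [List.cons_append, pvPartitionEq, if_neg hc]
    rw [ih rest (c :: acc) hp.2]
    simp

theorem pvPartition_split : ∀ (l acc k v : List Char),
    pvPartitionEq acc l = (k, true, v) →
    ∃ p, l = p ++ '=' :: v ∧ k = acc.reverse ++ p ∧ '=' ∉ p := by
  intro l
  induction l with
  | nil => simp [pvPartitionEq]
  | cons c cs ih =>
    intro acc k v h
    by_cases hc : c = '='
    · simp only [pvPartitionEq, if_pos hc, Prod.mk.injEq] at h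
      exact ⟨[], by simp [hc, h.2.2], by simp [h.1], by simp⟩
    · simp only [pvPartitionEq, if_neg hc] at h
      obtain ⟨p, hl, hk, hp⟩ := ih _ _ _ h
      refine ⟨c :: p, by simp [hl], by simpa using hk, ?_⟩
      simp only [List.mem_cons, not_or]
      exact ⟨fun he => hc he.symm, hp⟩

theorem pvMatch_iff (key : List Char) (hk : '=' ∉ key) (l : List Char) :
    l.take (key.length + 1) = key ++ ['='] ↔
      ∃ v, pvPartitionEq [] l = (key, true, v) := by
  constructor
  · intro h
    refine ⟨l.drop (key.length + 1), ?_⟩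
    have hl : l = (key ++ ['=']) ++ l.drop (key.length + 1) := by
      conv_lhs => rw [← List.take_append_drop (key.length + 1) l]
      rw [h]
    rw [hl]
    simpa using pvPartition_of_split key (l.drop (key.length + 1)) [] hk
  · rintro ⟨v, h⟩
    obtain ⟨p, hl, hkp, -⟩ := pvPartition_split l [] key v h
    simp only [List.reverse_nil, List.nil_append] at hkp
    subst hkp
    subst hl
    have he : key ++ '=' :: v = (key ++ ['=']) ++ v := by simp
    rw [he, List.take_append_of_le_length (by simp)]
    simp

theorem pvValue_eq (key : List Char) (l v : List Char)
    (h : pvPartitionEq [] l = (key, true, v)) : v = l.drop (key.length + 1) := by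
  obtain ⟨p, hl, hkp, -⟩ := pvPartition_split l [] key v h
  simp only [List.reverse_nil, List.nil_append] at hkp
  subst hkp; subst hl; simp

theorem pvSliceTake (s : String) (n : Nat) :
    (PySem.Str.slice s none (some (n:Int))).toList = s.toList.take n := by
  simp [PySem.Str.toList_slice, PySem.List.slice_to_natCast]

theorem pvSliceDrop (s : String) (n : Nat) :
    (PySem.Str.slice s (some (n:Int)) none).toList = s.toList.drop n := by
  simp [PySem.Str.toList_slice, PySem.List.slice_from_natCast]

-- A's slice test against 'key=' is exactly B's partition finding sep '=' under that key
theorem pvTest_iff (key : List Char) (kid : String) (n : Nat)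
    (hk : '=' ∉ key) (hn : n = key.length + 1) (hid : kid.toList = key ++ ['=']) (s : String) :
    ((PySem.Str.slice s none (some (n:Int)) == kid) = true) ↔
      ∃ v, pvPartitionEq [] s.toList = (key, true, v) := by
  rw [beq_iff_eq, ← String.toList_inj, pvSliceTake, hid, hn]
  exact pvMatch_iff key hk s.toList

-- one loop iteration preserves the invariant: B's dict lookups at the two keys track A's pair
theorem pvStep_one (s : String) (st : Option String × Option String)
    (d : PySem.Dict String String)
    (h1 : d.get? "GITLAB_SERVER_ACCOUNT_GLOBAL" = st.1)
    (h2 : d.get? "GITLAB_SERVER_PASSWORD_GLOBAL" = st.2) :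
    (pvStepB d s).get? "GITLAB_SERVER_ACCOUNT_GLOBAL" = (pvStepA st s).1 ∧
    (pvStepB d s).get? "GITLAB_SERVER_PASSWORD_GLOBAL" = (pvStepA st s).2 := by
  have tU := pvTest_iff ("GITLAB_SERVER_ACCOUNT_GLOBAL".toList) "GITLAB_SERVER_ACCOUNT_GLOBAL=" 29 (by decide) (by decide) (by decide) s
  have tP := pvTest_iff ("GITLAB_SERVER_PASSWORD_GLOBAL".toList) "GITLAB_SERVER_PASSWORD_GLOBAL=" 30 (by decide) (by decide) (by decide) s
  rcases hP : pvPartitionEq [] s.toList with ⟨k, b, v⟩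
  cases b with
  | false =>
    have hU : (PySem.Str.slice s none (some (29:Int)) == "GITLAB_SERVER_ACCOUNT_GLOBAL=") = false := by
      rw [Bool.eq_false_iff]; intro h
      obtain ⟨v', hv⟩ := tU.mp h; rw [hP] at hv; simp at hv
    have hPd : (PySem.Str.slice s none (some (30:Int)) == "GITLAB_SERVER_PASSWORD_GLOBAL=") = false := by
      rw [Bool.eq_false_iff]; intro h
      obtain ⟨v', hv⟩ := tP.mp h; rw [hP] at hv; simp at hv
    simp [pvStepA, pvStepB, hP, hU, hPd, h1, h2]
  | true =>
    by_cases hkU : k = "GITLAB_SERVER_ACCOUNT_GLOBAL".toList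
    · subst hkU
      have hU : (PySem.Str.slice s none (some (29:Int)) == "GITLAB_SERVER_ACCOUNT_GLOBAL=") = true := tU.mpr ⟨v, hP⟩
      have hPd : (PySem.Str.slice s none (some (30:Int)) == "GITLAB_SERVER_PASSWORD_GLOBAL=") = false := by
        rw [Bool.eq_false_iff]; intro h
        obtain ⟨v', hv⟩ := tP.mp h; rw [hP] at hv
        simp only [Prod.mk.injEq] at hv
        exact absurd hv.1 (by decide)
      have hv : v = s.toList.drop 29 := pvValue_eq _ _ _ hP
      have hsl : PySem.Str.slice s (some (29:Int)) none = String.ofList v := by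
        rw [← String.toList_inj, show (29:Int) = ((29:Nat):Int) by norm_num, pvSliceDrop]
        simp [hv]
      simp only [pvStepB, hP, pvStepA, hU, hPd]
      constructor
      · rw [show String.ofList "GITLAB_SERVER_ACCOUNT_GLOBAL".toList = "GITLAB_SERVER_ACCOUNT_GLOBAL" from String.ofList_toList]
        rw [PySem.Dict.get?_insert_self d _ _]
        simp [hsl]
      · rw [PySem.Dict.get?_insert_of_ne d _ (by rw [show String.ofList "GITLAB_SERVER_ACCOUNT_GLOBAL".toList = "GITLAB_SERVER_ACCOUNT_GLOBAL" from String.ofList_toList]; decide), h2]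
        simp
    · by_cases hkP : k = "GITLAB_SERVER_PASSWORD_GLOBAL".toList
      · subst hkP
        have hPd : (PySem.Str.slice s none (some (30:Int)) == "GITLAB_SERVER_PASSWORD_GLOBAL=") = true := tP.mpr ⟨v, hP⟩
        have hU : (PySem.Str.slice s none (some (29:Int)) == "GITLAB_SERVER_ACCOUNT_GLOBAL=") = false := by
          rw [Bool.eq_false_iff]; intro h
          obtain ⟨v', hv⟩ := tU.mp h; rw [hP] at hv
          simp only [Prod.mk.injEq] at hv
          exact absurd hv.1 (by decide)
        have hv : v = s.toList.drop 30 := pvValue_eq _ _ _ hP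
        have hsl : PySem.Str.slice s (some (30:Int)) none = String.ofList v := by
          rw [← String.toList_inj, show (30:Int) = ((30:Nat):Int) by norm_num, pvSliceDrop]
          simp [hv]
        simp only [pvStepB, hP, pvStepA, hU, hPd]
        constructor
        · rw [PySem.Dict.get?_insert_of_ne d _ (by rw [show String.ofList "GITLAB_SERVER_PASSWORD_GLOBAL".toList = "GITLAB_SERVER_PASSWORD_GLOBAL" from String.ofList_toList]; decide), h1]
          simp
        · rw [show String.ofList "GITLAB_SERVER_PASSWORD_GLOBAL".toList = "GITLAB_SERVER_PASSWORD_GLOBAL" from String.ofList_toList]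
          rw [PySem.Dict.get?_insert_self d _ _]
          simp [hsl]
      · have hU : (PySem.Str.slice s none (some (29:Int)) == "GITLAB_SERVER_ACCOUNT_GLOBAL=") = false := by
          rw [Bool.eq_false_iff]; intro h
          obtain ⟨v', hv⟩ := tU.mp h; rw [hP] at hv
          simp only [Prod.mk.injEq] at hv
          exact hkU hv.1
        have hPd : (PySem.Str.slice s none (some (30:Int)) == "GITLAB_SERVER_PASSWORD_GLOBAL=") = false := by
          rw [Bool.eq_false_iff]; intro h
          obtain ⟨v', hv⟩ := tP.mp h; rw [hP] at hv
          simp only [Prod.mk.injEq] at hv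
          exact hkP hv.1
        have hne1 : "GITLAB_SERVER_ACCOUNT_GLOBAL" ≠ String.ofList k := by
          intro h; apply hkU; rw [← String.toList_inj] at h; simpa using h.symm
        have hne2 : "GITLAB_SERVER_PASSWORD_GLOBAL" ≠ String.ofList k := by
          intro h; apply hkP; rw [← String.toList_inj] at h; simpa using h.symm
        simp only [pvStepB, hP, pvStepA, hU, hPd]
        rw [PySem.Dict.get?_insert_of_ne d _ hne1, PySem.Dict.get?_insert_of_ne d _ hne2]
        simp [h1, h2]

theorem pvInv (lines : List String) :
    ∀ (st : Option String × Option String) (d : PySem.Dict String String),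
    d.get? "GITLAB_SERVER_ACCOUNT_GLOBAL" = st.1 →
    d.get? "GITLAB_SERVER_PASSWORD_GLOBAL" = st.2 →
    (lines.foldl pvStepB d).get? "GITLAB_SERVER_ACCOUNT_GLOBAL" = (lines.foldl pvStepA st).1 ∧
    (lines.foldl pvStepB d).get? "GITLAB_SERVER_PASSWORD_GLOBAL" = (lines.foldl pvStepA st).2 := by
  induction lines with
  | nil => intro st d h1 h2; exact ⟨h1, h2⟩
  | cons s rest ih =>
    intro st d h1 h2
    obtain ⟨g1, g2⟩ := pvStep_one s st d h1 h2
    exact ih (pvStepA st s) (pvStepB d s) g1 g2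

theorem pv_eq (lines : List String) : parse_creds lines = parse_creds_alt lines := by
  obtain ⟨g1, g2⟩ := pvInv lines (none, none) PySem.Dict.empty (by simp) (by simp)
  unfold parse_creds parse_creds_alt
  simp only []
  rcases h : lines.foldl pvStepA (none, none) with ⟨u?, p?⟩
  rw [h] at g1 g2
  simp only at g1 g2
  rw [g1, g2]
  rcases u? with _ | u <;> rcases p? with _ | p <;> simp

-- ===== VERDICT (by name: the statement is the Claim_ definition above) =====
theorem parse_creds_spec : Claim_equal_parse_creds := by
  intro lines _ _
  unfold Spec_parse_creds
  exact pv_eq lines
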